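-- pv_equiv track=rewrite | github.com/ToasterXE/bwinf-r2-py | a3_neufickdeinmamer.py | get_numofsolutions
-- ===== SOURCE A (Python) =====
-- def get_numofsolutions(size):
--     numofsolutions = 0
--     for i in range(2, size+1):
--         new = 1
--         for e in range(i,size+1):
--             new *= e
--         numofsolutions += new
--
--     return numofsolutions
-- ===== SOURCE B (Python) =====
-- def get_numofsolutions(size):
--     total = 0
--     prod = 1
--     for i in range(size, 1, -1):
--         prod *= i
--         total += prod
--     return total
-- ===== Notes on version B (the rewrite author's own statement) =====
-- stated objective: faster
-- what changed: A recomputes the product i*(i+1)*...*size from scratch for every i (nested loops); B makes a single downward pass keeping a running product and adding it to the total.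
import Mathlib
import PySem

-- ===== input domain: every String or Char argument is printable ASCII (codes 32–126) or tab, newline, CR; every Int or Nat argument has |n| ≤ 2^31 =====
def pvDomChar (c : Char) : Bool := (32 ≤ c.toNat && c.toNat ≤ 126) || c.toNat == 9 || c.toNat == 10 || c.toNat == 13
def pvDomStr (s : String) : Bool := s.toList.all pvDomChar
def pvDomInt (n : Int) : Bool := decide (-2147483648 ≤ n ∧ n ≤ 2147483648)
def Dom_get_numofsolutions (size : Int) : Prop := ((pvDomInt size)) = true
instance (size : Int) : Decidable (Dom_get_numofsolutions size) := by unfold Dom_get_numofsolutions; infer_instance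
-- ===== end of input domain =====

-- B replaces A's quadratic nested product loops by one downward pass with a running product (O(size) vs O(size^2) multiplications).

-- ===== PORT A =====
def get_numofsolutions (size : Int) : Int :=
  (PySem.List.pyRange 2 (size + 1) 1).foldl
    (fun numofsolutions i =>
      numofsolutions + (PySem.List.pyRange i (size + 1) 1).foldl (fun new e => new * e) 1)
    0

-- ===== PORT B =====
def get_numofsolutions_alt (size : Int) : Int :=
  ((PySem.List.pyRange size 1 (-1)).foldl
    (fun (st : Int × Int) i => (st.1 * i, st.2 + st.1 * i)) (1, 0)).2

-- ===== PRECONDITION & SPEC =====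
def Spec_get_numofsolutions (size : Int) (out : Int) : Prop := out = get_numofsolutions_alt size
instance (size : Int) (out : Int) : Decidable (Spec_get_numofsolutions size out) := by unfold Spec_get_numofsolutions; infer_instance

-- ===== CLAIM (what is proved, stated in full; the proofs are below) =====
def Claim_equal_get_numofsolutions : Prop := ∀ (size : Int), Dom_get_numofsolutions size → Spec_get_numofsolutions size (get_numofsolutions size)

-- ===== LEMMAS AND PROOFS =====

-- A's inner loop is a product
theorem pvFoldlMul (L : List Int) (c : Int) :
    L.foldl (fun new e => new * e) c = c * L.prod := by
  induction L generalizing c with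
  | nil => simp
  | cons x xs ih => simp [List.foldl_cons, ih (c * x), mul_assoc]

-- A's outer loop is a sum
theorem pvFoldlAdd (g : Int → Int) (L : List Int) (c : Int) :
    L.foldl (fun acc i => acc + g i) c = c + (L.map g).sum := by
  induction L generalizing c with
  | nil => simp
  | cons x xs ih => simp [List.foldl_cons, ih (c + g x), add_assoc]

-- sum of a list scaled on the right
theorem pvSumMulRight (f : Int → Int) (c : Int) (L : List Int) :
    (L.map (fun i => f i * c)).sum = (L.map f).sum * c := by
  induction L with
  | nil => simp
  | cons x xs ih => simp [ih, add_mul]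

-- B's fold scales linearly in its initial state
theorem pvFoldScale (L : List Int) (p s : Int) :
    (L.foldl (fun (st : Int × Int) i => (st.1 * i, st.2 + st.1 * i)) (p, s)) =
    (p * (L.foldl (fun (st : Int × Int) i => (st.1 * i, st.2 + st.1 * i)) (1, 0)).1,
     s + p * (L.foldl (fun (st : Int × Int) i => (st.1 * i, st.2 + st.1 * i)) (1, 0)).2) := by
  induction L generalizing p s with
  | nil => simp
  | cons x xs ih =>
    simp only [List.foldl_cons]
    rw [ih (p * x) (s + p * x), ih (1 * x) (0 + 1 * x)]
    simp only [Prod.mk.injEq]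
    constructor <;> ring

-- A written as a sum of products
theorem pvA_sum (size : Int) :
    get_numofsolutions size =
      ((PySem.List.pyRange 2 (size + 1) 1).map
        (fun i => (PySem.List.pyRange i (size + 1) 1).prod)).sum := by
  unfold get_numofsolutions
  rw [pvFoldlAdd (fun i => (PySem.List.pyRange i (size + 1) 1).foldl (fun new e => new * e) 1)]
  simp only [pvFoldlMul, one_mul, zero_add]

-- the shared recurrence, by induction on n with size = n + 1
theorem pvMain (n : Nat) :
    get_numofsolutions ((n : Int) + 1) = get_numofsolutions_alt ((n : Int) + 1) := by
  induction n with
  | zero =>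
    unfold get_numofsolutions get_numofsolutions_alt
    rw [PySem.List.pyRange_one_eq_nil (by norm_num), PySem.List.pyRange_neg_one_eq_nil (by norm_num)]
    simp
  | succ n ih =>
    have hsz : ((n : Int) + 1 + 1) = (n : Int) + 2 := by ring
    -- A side
    have hA : get_numofsolutions ((n : Int) + 2) =
        (get_numofsolutions ((n : Int) + 1) + 1) * ((n : Int) + 2) := by
      rw [pvA_sum, pvA_sum]
      have h11 : ((n : Int) + 1 + 1) = (n : Int) + 2 := by ring
      rw [h11]
      have hsplit : PySem.List.pyRange 2 ((n : Int) + 2 + 1) 1 =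
          PySem.List.pyRange 2 ((n : Int) + 2) 1 ++ [(n : Int) + 2] := by
        have := PySem.List.pyRange_one_succ_right (a := 2) (b := (n : Int) + 2) (by omega)
        simpa using this
      rw [hsplit, List.map_append, List.sum_append]
      have hinner : ∀ i ∈ PySem.List.pyRange 2 ((n : Int) + 2) 1,
          (PySem.List.pyRange i ((n : Int) + 2 + 1) 1).prod =
          (PySem.List.pyRange i ((n : Int) + 2) 1).prod * ((n : Int) + 2) := by
        intro i hi
        rw [PySem.List.mem_pyRange_one] at hi
        have := PySem.List.pyRange_one_succ_right (a := i) (b := (n : Int) + 2) (by omega)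
        rw [this, List.prod_append]
        simp
      rw [List.map_congr_left hinner, pvSumMulRight]
      simp only [List.map_cons, List.map_nil, List.sum_cons, List.sum_nil, add_zero]
      rw [PySem.List.pyRange_one_singleton]
      simp; ring
    -- B side
    have hB : get_numofsolutions_alt ((n : Int) + 2) =
        ((n : Int) + 2) + ((n : Int) + 2) * get_numofsolutions_alt ((n : Int) + 1) := by
      unfold get_numofsolutions_alt
      rw [PySem.List.pyRange_neg_one_cons (by omega)]
      simp only [List.foldl_cons]
      have h1 : ((n : Int) + 2 - 1) = (n : Int) + 1 := by ring
      rw [h1, pvFoldScale]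
      simp
    push_cast
    rw [hsz, hA, hB, ih]; ring

-- ===== VERDICT (by name: the statement is the Claim_ definition above) =====
theorem get_numofsolutions_spec : Claim_equal_get_numofsolutions := by
  intro size _
  unfold Spec_get_numofsolutions
  by_cases h : 1 ≤ size
  · obtain ⟨n, hn⟩ : ∃ n : Nat, size = (n : Int) + 1 :=
      ⟨(size - 1).toNat, by omega⟩
    rw [hn, pvMain]
  · unfold get_numofsolutions get_numofsolutions_alt
    rw [PySem.List.pyRange_one_eq_nil (by omega), PySem.List.pyRange_neg_one_eq_nil (by omega)]
    simp
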